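-- pv_equiv track=rewrite | github.com/zamurda/dune-classification | csvtools/helpers.py | check_unique_headers
-- ===== SOURCE A (Python) =====
-- from collections import Counter as ctr
--
-- def check_unique_headers(existing_headers:list, new_headers:list=None) -> bool:
--     """
--     True if all headers are unique
--     """
--     if new_headers is not None:
--
--         if isinstance(new_headers, list):
--
--             return (
--                 (ctr(list(set(existing_headers))) == ctr(existing_headers))
--                 and (ctr(list(set(new_headers))) == ctr(new_headers))
--                 and not (any([header in existing_headers for header in new_headers]))
--                 )
--
--         else:
--
--             return not (new_headers in existing_headers)
--     else:
--         return ctr(list(set(existing_headers))) == ctr(existing_headers) if isinstance(existing_headers, list) else True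
-- ===== SOURCE B (Python) =====
-- def check_unique_headers(existing_headers, new_headers=None):
--     """
--     True if all headers are unique
--     """
--     if new_headers is None:
--         combined = list(existing_headers)
--     elif isinstance(new_headers, list):
--         combined = list(existing_headers) + list(new_headers)
--     else:
--         return new_headers not in existing_headers
--     return len(set(combined)) == len(combined)
-- ===== Notes on version B (the rewrite author's own statement) =====
-- stated objective: simpler
-- what changed: Replaced A's two separate Counter-vs-set uniqueness checks plus a nested any-membership overlap scan with a single uniqueness test on the concatenation existing+new (len(set(combined)) == len(combined)).
import Mathlib
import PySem

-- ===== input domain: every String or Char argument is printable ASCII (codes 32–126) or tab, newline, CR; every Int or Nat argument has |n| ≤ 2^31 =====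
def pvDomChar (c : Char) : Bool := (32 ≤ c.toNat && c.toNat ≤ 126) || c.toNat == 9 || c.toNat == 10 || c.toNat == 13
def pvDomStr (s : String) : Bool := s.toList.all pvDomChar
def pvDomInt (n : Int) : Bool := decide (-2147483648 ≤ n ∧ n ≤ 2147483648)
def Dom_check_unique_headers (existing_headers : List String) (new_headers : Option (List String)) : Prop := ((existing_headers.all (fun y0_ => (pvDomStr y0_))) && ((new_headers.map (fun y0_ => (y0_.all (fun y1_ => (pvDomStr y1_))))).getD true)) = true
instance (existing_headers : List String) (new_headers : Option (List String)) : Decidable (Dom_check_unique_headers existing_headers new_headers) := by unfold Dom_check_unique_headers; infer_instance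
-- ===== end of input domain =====

-- B replaces A's two Counter-based uniqueness checks plus a nested overlap scan with one
-- uniqueness test on the concatenation existing+new (objective: simpler).

-- ===== PORT A =====
-- Python's Counter == is dict equality ignoring order: same key set and equal counts on
-- those keys (exact here: keys present in the left counter cover both when key sets agree).
def pvCtrEq (a b : PySem.Dict String Int) : Bool :=
  PySem.Set.equal a.keys b.keys && a.keys.all (fun k => a.getD k 0 == b.getD k 0)

def check_unique_headers (existing_headers : List String) (new_headers : Option (List String)) : Bool :=
  match new_headers with
  | some ns =>
      -- ctr(list(set(e))) == ctr(e) and ctr(list(set(ns))) == ctr(ns)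
      -- and not any([header in e for header in ns])
      pvCtrEq (PySem.Dict.counter (PySem.Set.ofList existing_headers)) (PySem.Dict.counter existing_headers)
      && pvCtrEq (PySem.Dict.counter (PySem.Set.ofList ns)) (PySem.Dict.counter ns)
      && !((ns.map (fun header => existing_headers.contains header)).any id)
  | none =>
      -- existing_headers is always a list under the type convention, so the isinstance branch taken
      pvCtrEq (PySem.Dict.counter (PySem.Set.ofList existing_headers)) (PySem.Dict.counter existing_headers)

-- ===== PORT B =====
def check_unique_headers_alt (existing_headers : List String) (new_headers : Option (List String)) : Bool :=
  match new_headers with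
  | none =>
      let combined := existing_headers
      (PySem.Set.ofList combined).length == combined.length
  | some ns =>
      let combined := existing_headers ++ ns
      (PySem.Set.ofList combined).length == combined.length

-- ===== PRECONDITION & SPEC =====
def Spec_check_unique_headers (existing_headers : List String) (new_headers : Option (List String)) (out : Bool) : Prop := out = check_unique_headers_alt existing_headers new_headers
instance (existing_headers : List String) (new_headers : Option (List String)) (out : Bool) : Decidable (Spec_check_unique_headers existing_headers new_headers out) := by unfold Spec_check_unique_headers; infer_instance

-- ===== CLAIM (what is proved, stated in full; the proofs are below) =====
def Claim_equal_check_unique_headers : Prop := ∀ (existing_headers : List String) (new_headers : Option (List String)), Dom_check_unique_headers existing_headers new_headers → Spec_check_unique_headers existing_headers new_headers (check_unique_headers existing_headers new_headers)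

-- ===== LEMMAS AND PROOFS =====

-- set(xs) has the same length as xs exactly when xs has no duplicates
theorem pv_len_ofList_iff (xs : List String) :
    (PySem.Set.ofList xs).length = xs.length ↔ xs.Nodup := by
  have hperm : (PySem.Set.ofList xs).Perm xs.dedup := by
    refine List.Subperm.antisymm
      ((PySem.Set.nodup_ofList xs).subperm ?_)
      ((List.nodup_dedup xs).subperm ?_)
    · intro a ha
      rw [List.mem_dedup]
      exact (PySem.Set.mem_ofList xs a).mp ha
    · intro a ha
      exact (PySem.Set.mem_ofList xs a).mpr (List.mem_dedup.mp ha)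
  rw [hperm.length_eq]
  constructor
  · intro h
    rw [← List.dedup_eq_self]
    exact (List.dedup_sublist xs).eq_of_length h
  · intro h
    rw [List.dedup_eq_self.mpr h]

-- A's Counter-vs-set check is exactly a Nodup test
theorem pv_ctrEq_iff (xs : List String) :
    pvCtrEq (PySem.Dict.counter (PySem.Set.ofList xs)) (PySem.Dict.counter xs) = true ↔ xs.Nodup := by
  unfold pvCtrEq
  rw [Bool.and_eq_true]
  simp only [PySem.Dict.keys_counter, PySem.Set.ofList_ofList, PySem.Dict.getD_counter,
    List.all_eq_true, beq_iff_eq]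
  constructor
  · rintro ⟨-, hall⟩
    rw [List.nodup_iff_count_eq_one]
    intro a ha
    have ha' : a ∈ PySem.Set.ofList xs := (PySem.Set.mem_ofList xs a).mpr ha
    have := hall a ha'
    have h1 : List.count a (PySem.Set.ofList xs) = 1 :=
      List.count_eq_one_of_mem (PySem.Set.nodup_ofList xs) ha'
    omega
  · intro hnd
    refine ⟨(PySem.Set.equal_iff _ _).mpr (fun x => Iff.rfl), ?_⟩
    intro a ha
    rw [List.count_eq_one_of_mem (PySem.Set.nodup_ofList xs) ha,
      List.count_eq_one_of_mem hnd ((PySem.Set.mem_ofList xs a).mp ha)]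

-- ===== VERDICT (by name: the statement is the Claim_ definition above) =====
theorem check_unique_headers_spec : Claim_equal_check_unique_headers := by
  intro e n _
  unfold Spec_check_unique_headers
  cases n with
  | none =>
    simp only [check_unique_headers, check_unique_headers_alt]
    rw [Bool.eq_iff_iff, pv_ctrEq_iff, beq_iff_eq, pv_len_ofList_iff]
  | some ns =>
    simp only [check_unique_headers, check_unique_headers_alt]
    rw [Bool.eq_iff_iff, beq_iff_eq, pv_len_ofList_iff, List.nodup_append]
    simp only [Bool.and_eq_true, pv_ctrEq_iff, Bool.not_eq_eq_eq_not, Bool.not_true,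
      List.any_eq_false, List.mem_map, id_eq, List.contains_eq_mem]
    constructor
    · rintro ⟨⟨he, hns⟩, hno⟩
      refine ⟨he, hns, ?_⟩
      rintro a ha b hb rfl
      have h1 := hno (decide (a ∈ e)) ⟨a, hb, rfl⟩
      have h2 : ¬ (a ∈ e) := by simpa using h1
      exact h2 ha
    · rintro ⟨he, hns, hdisj⟩
      refine ⟨⟨he, hns⟩, ?_⟩
      rintro x ⟨b, hb, rfl⟩
      have h2 : ¬ (b ∈ e) := fun hbe => hdisj b hbe b hb rfl
      simpa using h2
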